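-- pv_equiv track=rewrite | github.com/NQBH/advanced_STEM_beyond | IT_fundamentals/Python/divisor_info.py | thong_tin_uoc
-- ===== SOURCE A (Python) =====
-- def thong_tin_uoc(n):
--     so_uoc = 0
--     tong_uoc = 0
--     tich_uoc = 1
--
--     for i in range(1, n + 1):
--         if n % i == 0:
--             so_uoc += 1
--             tong_uoc += i
--             tich_uoc *= i
--
--     return so_uoc, tong_uoc, tich_uoc
-- ===== SOURCE B (Python) =====
-- def thong_tin_uoc(n):
--     so_uoc = 0
--     tong_uoc = 0
--     tich_uoc = 1
--     i = 1
--     while i * i <= n: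
--         if n % i == 0:
--             j = n // i
--             so_uoc += 1
--             tong_uoc += i
--             tich_uoc *= i
--             if j != i:
--                 so_uoc += 1
--                 tong_uoc += j
--                 tich_uoc *= j
--         i += 1
--     return so_uoc, tong_uoc, tich_uoc
-- ===== Notes on version B (the rewrite author's own statement) =====
-- stated objective: faster
-- what changed: B enumerates only i up to sqrt(n) and accounts for each divisor pair (i, n//i) at once, instead of A's full scan of 1..n.
import Mathlib
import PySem

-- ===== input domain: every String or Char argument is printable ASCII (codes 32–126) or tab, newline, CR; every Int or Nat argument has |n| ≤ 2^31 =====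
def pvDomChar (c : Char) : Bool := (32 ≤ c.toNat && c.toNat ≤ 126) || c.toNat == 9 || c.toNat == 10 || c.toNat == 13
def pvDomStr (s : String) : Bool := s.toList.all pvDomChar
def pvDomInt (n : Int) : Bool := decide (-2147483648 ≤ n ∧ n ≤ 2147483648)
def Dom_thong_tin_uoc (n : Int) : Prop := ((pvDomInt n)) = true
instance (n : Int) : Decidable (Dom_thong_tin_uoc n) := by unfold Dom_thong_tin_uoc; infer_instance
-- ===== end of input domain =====

-- B replaces A's scan of 1..n with the enumeration of divisor pairs (i, n//i) for i*i ≤ n.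

-- ===== PORT A =====
def thong_tin_uoc (n : Int) : List Int :=
  let r := (PySem.List.pyRange 1 (n + 1) 1).foldl
    (fun (st : Int × Int × Int) i =>
      if PySem.Int.mod n i = 0 then (st.1 + 1, st.2.1 + i, st.2.2 * i) else st)
    (0, 0, 1)
  [r.1, r.2.1, r.2.2]

-- ===== PORT B =====
-- while i * i <= n: … ; terminates because i increases and stays ≤ n while the guard holds
def pvAltLoop (n i : Int) (st : Int × Int × Int) : Int × Int × Int :=
  if i * i ≤ n then
    let st' :=
      if PySem.Int.mod n i = 0 then
        let j := PySem.Int.floordiv n i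
        let st1 := (st.1 + 1, st.2.1 + i, st.2.2 * i)
        if j ≠ i then (st1.1 + 1, st1.2.1 + j, st1.2.2 * j) else st1
      else st
    pvAltLoop n (i + 1) st'
  else st
termination_by (n + 1 - i).toNat
decreasing_by
  have hii : i ≤ i * i := by
    by_cases h : 1 ≤ i
    · nlinarith
    · nlinarith [mul_self_nonneg i]
  omega

def thong_tin_uoc_alt (n : Int) : List Int :=
  let r := pvAltLoop n 1 (0, 0, 1)
  [r.1, r.2.1, r.2.2]

-- ===== PRECONDITION & SPEC =====
def Spec_thong_tin_uoc (n : Int) (out : List Int) : Prop := out = thong_tin_uoc_alt n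
instance (n : Int) (out : List Int) : Decidable (Spec_thong_tin_uoc n out) := by unfold Spec_thong_tin_uoc; infer_instance

-- ===== CLAIM (what is proved, stated in full; the proofs are below) =====
def Claim_equal_thong_tin_uoc : Prop := ∀ (n : Int), Dom_thong_tin_uoc n → Spec_thong_tin_uoc n (thong_tin_uoc n)

-- ===== LEMMAS AND PROOFS =====

-- the list of divisors A's loop counts, in loop order
def pvDA (n : Int) : List Int :=
  (PySem.List.pyRange 1 (n + 1) 1).filter (fun i => decide (PySem.Int.mod n i = 0))

-- the list of divisors B's loop emits, in loop order
def pvE (n i : Int) : List Int :=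
  if i * i ≤ n then
    (if PySem.Int.mod n i = 0 then
       i :: (if PySem.Int.floordiv n i ≠ i then [PySem.Int.floordiv n i] else [])
     else []) ++ pvE n (i + 1)
  else []
termination_by (n + 1 - i).toNat
decreasing_by
  have hii : i ≤ i * i := by
    by_cases h : 1 ≤ i
    · nlinarith
    · nlinarith [mul_self_nonneg i]
  omega

-- a conditional accumulating fold is the plain fold over the filtered list
lemma pv_foldl_if_filter {α β : Type} (p : α → Prop) [DecidablePred p] (f : β → α → β) :
    ∀ (l : List α) (st : β),
      l.foldl (fun st x => if p x then f st x else st) st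
        = (l.filter (fun x => decide (p x))).foldl f st := by
  intro l
  induction l with
  | nil => intro st; simp
  | cons a l ih =>
    intro st
    by_cases h : p a <;> simp [h, ih]

-- the (count, sum, product) accumulator, in closed form
lemma pv_foldl_stats :
    ∀ (l : List Int) (st : Int × Int × Int),
      l.foldl (fun (st : Int × Int × Int) i => (st.1 + 1, st.2.1 + i, st.2.2 * i)) st
        = (st.1 + l.length, st.2.1 + l.sum, st.2.2 * l.prod) := by
  intro l
  induction l with
  | nil => intro st; simp
  | cons a l ih =>
    intro st
    simp [ih]
    refine ⟨by ring, by ring, by ring⟩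

-- B's loop returns the stats of the emitted divisor list
lemma pv_altLoop_eq (n : Int) :
    ∀ (i : Int) (st : Int × Int × Int),
      pvAltLoop n i st = (st.1 + (pvE n i).length, st.2.1 + (pvE n i).sum, st.2.2 * (pvE n i).prod) := by
  intro i st
  fun_induction pvAltLoop n i st with
  | case1 i st h st' ih =>
      rw [ih]
      conv_rhs => rw [pvE, if_pos h]
      simp only [st']
      by_cases h1 : PySem.Int.mod n i = 0
      · by_cases h2 : PySem.Int.floordiv n i = i
        · simp [h1, h2, Prod.ext_iff]
          refine ⟨by ring, by ring, by ring⟩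
        · simp [h1, h2, Prod.ext_iff]
          refine ⟨by ring, by ring, by ring⟩
      · simp [h1]
  | case2 i st h =>
      rw [pvE, if_neg h]
      simp

-- when i divides n, n//i times i is n
lemma pv_fd_mul (n i : Int) (hi : 0 < i) (h : PySem.Int.mod n i = 0) :
    PySem.Int.floordiv n i * i = n := by
  rw [PySem.Int.floordiv_eq_ediv_of_pos hi]
  exact Int.ediv_mul_cancel ((PySem.Int.mod_eq_zero_iff_dvd n i).mp h)

-- membership in the emitted list: x is half of a divisor pair whose both halves are ≥ i
lemma pv_mem_pvE (n : Int) (hn : 1 ≤ n) (x : Int) :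
    ∀ (i : Int), 1 ≤ i → (x ∈ pvE n i ↔ ∃ y, x * y = n ∧ i ≤ x ∧ i ≤ y) := by
  suffices H : ∀ (k : Nat) (i : Int), (n + 1 - i).toNat ≤ k → 1 ≤ i →
      (x ∈ pvE n i ↔ ∃ y, x * y = n ∧ i ≤ x ∧ i ≤ y) by
    intro i hi; exact H (n + 1 - i).toNat i le_rfl hi
  intro k
  induction k with
  | zero =>
    intro i hk hi
    have hni : n + 1 ≤ i := by omega
    have hg : ¬ i * i ≤ n := by nlinarith
    rw [pvE, if_neg hg]
    simp only [List.not_mem_nil, false_iff]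
    rintro ⟨y, hxy, hx, hy⟩
    nlinarith
  | succ k ih =>
    intro i hk hi
    by_cases hg : i * i ≤ n
    · have hin : i ≤ n := by nlinarith
      have IH := ih (i + 1) (by omega) (by omega)
      rw [pvE, if_pos hg]
      simp only [List.mem_append, IH]
      constructor
      · rintro (hhead | ⟨y, hxy, hx, hy⟩)
        · by_cases h1 : PySem.Int.mod n i = 0
          · have hfd := pv_fd_mul n i (by omega) h1
            have hfdge : i ≤ PySem.Int.floordiv n i := by nlinarith
            rw [if_pos h1] at hhead
            rcases List.mem_cons.mp hhead with h3 | htl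
            · exact ⟨PySem.Int.floordiv n i, by rw [h3, mul_comm]; exact hfd, le_of_eq h3.symm, hfdge⟩
            · by_cases h2 : PySem.Int.floordiv n i ≠ i
              · rw [if_pos h2] at htl
                have h4 := List.mem_singleton.mp htl
                exact ⟨i, by rw [h4]; exact hfd, h4 ▸ hfdge, le_rfl⟩
              · rw [if_neg h2] at htl
                exact absurd htl (List.not_mem_nil)
          · rw [if_neg h1] at hhead
            exact absurd hhead (List.not_mem_nil)
        · exact ⟨y, hxy, by omega, by omega⟩
      · rintro ⟨y, hxy, hx, hy⟩
        by_cases hxi : x = i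
        · subst hxi
          have h1 : PySem.Int.mod n x = 0 :=
            (PySem.Int.mod_eq_zero_iff_dvd n x).mpr ⟨y, hxy.symm⟩
          left; rw [if_pos h1]; exact List.mem_cons_self
        · by_cases hyi : y = i
          · subst hyi
            have h1 : PySem.Int.mod n y = 0 :=
              (PySem.Int.mod_eq_zero_iff_dvd n y).mpr ⟨x, hxy.symm.trans (mul_comm x y)⟩
            have hfd := pv_fd_mul n y (by omega) h1
            have hxfd : x = PySem.Int.floordiv n y := by
              have := hfd.trans hxy.symm
              exact (mul_right_cancel₀ (by omega : y ≠ 0) this).symm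
            left; rw [if_pos h1, hxfd]
            have : PySem.Int.floordiv n y ≠ y := by rw [← hxfd]; exact hxi
            rw [if_pos this]
            exact List.mem_cons_of_mem _ (List.mem_singleton.mpr rfl)
          · right
            exact ⟨y, hxy, by omega, by omega⟩
    · rw [pvE, if_neg hg]
      simp only [List.not_mem_nil, false_iff]
      rintro ⟨y, hxy, hx, hy⟩
      nlinarith

lemma pv_nodup_pvE (n : Int) (hn : 1 ≤ n) :
    ∀ (i : Int), 1 ≤ i → (pvE n i).Nodup := by
  suffices H : ∀ (k : Nat) (i : Int), (n + 1 - i).toNat ≤ k → 1 ≤ i → (pvE n i).Nodup by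
    intro i hi; exact H (n + 1 - i).toNat i le_rfl hi
  intro k
  induction k with
  | zero =>
    intro i hk hi
    have hni : n + 1 ≤ i := by omega
    have hg : ¬ i * i ≤ n := by nlinarith
    rw [pvE, if_neg hg]; exact List.nodup_nil
  | succ k ih =>
    intro i hk hi
    by_cases hg : i * i ≤ n
    · have hin : i ≤ n := by nlinarith
      have IH := ih (i + 1) (by omega) (by omega)
      have hmem := fun z => pv_mem_pvE n hn z (i + 1) (by omega)
      rw [pvE, if_pos hg]
      have hitail : i ∉ pvE n (i + 1) := by
        intro hm
        obtain ⟨y, hxy, hx, hy⟩ := (hmem i).mp hm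
        omega
      by_cases h1 : PySem.Int.mod n i = 0
      · rw [if_pos h1]
        have hfd := pv_fd_mul n i (by omega) h1
        by_cases h2 : PySem.Int.floordiv n i ≠ i
        · rw [if_pos h2]
          have hfdtail : PySem.Int.floordiv n i ∉ pvE n (i + 1) := by
            intro hm
            obtain ⟨y, hxy, hx, hy⟩ := (hmem _).mp hm
            have hyi : y = i := by
              have h5 : PySem.Int.floordiv n i * y = PySem.Int.floordiv n i * i := by
                rw [hxy]; exact hfd.symm
              exact mul_left_cancel₀ (by omega) h5
            omega
          simp only [List.cons_append, List.nodup_cons, List.mem_cons]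
          exact ⟨by push Not; exact ⟨fun h => h2 h.symm, hitail⟩, hfdtail, IH⟩
        · rw [if_neg h2]
          simp only [List.cons_append, List.nil_append, List.nodup_cons]
          exact ⟨hitail, IH⟩
      · rw [if_neg h1]; simpa using IH
    · rw [pvE, if_neg hg]; exact List.nodup_nil

-- B's divisor list is a rearrangement of A's
lemma pv_perm (n : Int) (hn : 1 ≤ n) : (pvE n 1).Perm (pvDA n) := by
  have h1 := pv_nodup_pvE n hn 1 le_rfl
  have h2 : (pvDA n).Nodup := (PySem.List.nodup_pyRange_one 1 (n + 1)).filter _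
  rw [List.perm_ext_iff_of_nodup h1 h2]
  intro a
  rw [pv_mem_pvE n hn a 1 le_rfl]
  unfold pvDA
  simp only [List.mem_filter, PySem.List.mem_pyRange_one, decide_eq_true_eq,
    PySem.Int.mod_eq_zero_iff_dvd]
  constructor
  · rintro ⟨y, hxy, hx, hy⟩
    exact ⟨⟨hx, by nlinarith⟩, ⟨y, hxy.symm⟩⟩
  · rintro ⟨⟨h1a, h2a⟩, ⟨c, hc⟩⟩
    exact ⟨c, hc.symm, h1a, by nlinarith⟩

-- ===== VERDICT (by name: the statement is the Claim_ definition above) =====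
theorem thong_tin_uoc_spec : Claim_equal_thong_tin_uoc := by
  intro n _
  unfold Spec_thong_tin_uoc thong_tin_uoc thong_tin_uoc_alt
  by_cases hn : 1 ≤ n
  · rw [pv_foldl_if_filter (fun i => PySem.Int.mod n i = 0)
        (fun (st : Int × Int × Int) i => (st.1 + 1, st.2.1 + i, st.2.2 * i))]
    rw [pv_foldl_stats, pv_altLoop_eq n 1 (0, 0, 1)]
    have hp := pv_perm n hn
    rw [show ((PySem.List.pyRange 1 (n + 1) 1).filter fun i => decide (PySem.Int.mod n i = 0))
          = pvDA n from rfl]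
    rw [← hp.length_eq, ← hp.sum_eq, ← hp.prod_eq]
  · have h0 : PySem.List.pyRange 1 (n + 1) 1 = [] := PySem.List.pyRange_one_eq_nil (by omega)
    rw [h0, pvAltLoop, if_neg (by nlinarith : ¬ (1 : Int) * 1 ≤ n)]
    simp
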